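-- pv_equiv track=rewrite | github.com/ariuk44/retake_exam_prep | day_3.py | isRailroadTie1
-- ===== SOURCE A (Python) =====
-- def isRailroadTie1(arr):
--     n = len(arr)
--     if n == 0:
--         return 0
--     if all(x == 0 for x in arr):
--         return 0
--     for i in range(n):
--         if arr[i] == 0:
--             if i == 0 or i == n - 1:
--                 return 0
--             if arr[i - 1] == 0 or arr[i + 1] == 0:
--                 return 0
--         else:
--             neighbors = 0
--             if i > 0 and arr[i - 1] != 0:
--                 neighbors += 1
--             if i < n - 1 and arr[i + 1] != 0:
--                 neighbors += 1
--             if neighbors != 1: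
--                 return 0
--     return 1
-- ===== SOURCE B (Python) =====
-- def isRailroadTie1(arr):
--     # consume the pattern "NN" then repeated "ZNN" chunks, three elements at a time
--     n = len(arr)
--     if n < 2 or arr[0] == 0 or arr[1] == 0:
--         return 0
--     i = 2
--     while i < n:
--         if i + 3 > n or arr[i] != 0 or arr[i + 1] == 0 or arr[i + 2] == 0:
--             return 0
--         i += 3
--     return 1
-- ===== Notes on version B (the rewrite author's own statement) =====
-- stated objective: alternative
-- what changed: Replaces the per-index neighbor-counting loop (with separate empty and all-zero prechecks) by a chunk-wise pattern scan: require a leading pair of nonzeros, then consume the rest in three-element 'zero, nonzero, nonzero' chunks.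
import Mathlib
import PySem

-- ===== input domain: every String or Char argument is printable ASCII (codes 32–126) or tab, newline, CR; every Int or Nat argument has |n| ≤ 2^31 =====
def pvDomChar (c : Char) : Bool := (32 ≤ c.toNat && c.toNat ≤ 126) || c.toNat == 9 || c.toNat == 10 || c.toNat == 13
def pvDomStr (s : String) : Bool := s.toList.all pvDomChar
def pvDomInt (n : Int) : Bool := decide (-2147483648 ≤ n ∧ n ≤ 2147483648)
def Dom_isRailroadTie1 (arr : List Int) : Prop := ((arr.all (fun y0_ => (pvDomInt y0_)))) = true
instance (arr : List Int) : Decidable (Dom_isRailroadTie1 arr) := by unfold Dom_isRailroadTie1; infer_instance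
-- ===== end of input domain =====

-- B replaces A's per-index neighbor-counting loop by a chunk-wise scan (a leading "NN" pair, then "ZNN" chunks of three); alternative decomposition, same cost.

-- ===== PORT A =====
def isRailroadTie1Loop (arr : List Int) (n : Nat) (i : Nat) : Int :=
  if _h : i < n then
    if (PySem.List.pyGet? arr (i : Int)).getD 0 = 0 then
      if i = 0 ∨ i = n - 1 then 0
      else if (PySem.List.pyGet? arr ((i : Int) - 1)).getD 0 = 0 ∨
              (PySem.List.pyGet? arr ((i : Int) + 1)).getD 0 = 0 then 0
      else isRailroadTie1Loop arr n (i + 1)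
    else
      let neighbors : Int :=
        (if 0 < i ∧ (PySem.List.pyGet? arr ((i : Int) - 1)).getD 0 ≠ 0 then 1 else 0)
        + (if i < n - 1 ∧ (PySem.List.pyGet? arr ((i : Int) + 1)).getD 0 ≠ 0 then 1 else 0)
      if neighbors ≠ 1 then 0 else isRailroadTie1Loop arr n (i + 1)
  else 1
termination_by n - i

def isRailroadTie1 (arr : List Int) : Int :=
  let n := arr.length
  if n = 0 then 0
  else if arr.all (fun x => x == 0) then 0
  else isRailroadTie1Loop arr n 0

-- ===== PORT B =====
def isRailroadTie1AltLoop (arr : List Int) (n : Nat) (i : Nat) : Int :=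
  if _h : i < n then
    if n < i + 3 ∨ (PySem.List.pyGet? arr (i : Int)).getD 0 ≠ 0 ∨
       (PySem.List.pyGet? arr ((i : Int) + 1)).getD 0 = 0 ∨
       (PySem.List.pyGet? arr ((i : Int) + 2)).getD 0 = 0 then 0
    else isRailroadTie1AltLoop arr n (i + 3)
  else 1
termination_by n - i

def isRailroadTie1_alt (arr : List Int) : Int :=
  let n := arr.length
  if n < 2 ∨ (PySem.List.pyGet? arr 0).getD 0 = 0 ∨ (PySem.List.pyGet? arr 1).getD 0 = 0 then 0
  else isRailroadTie1AltLoop arr n 2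

-- ===== PRECONDITION & SPEC =====
def Spec_isRailroadTie1 (arr : List Int) (out : Int) : Prop := out = isRailroadTie1_alt arr
instance (arr : List Int) (out : Int) : Decidable (Spec_isRailroadTie1 arr out) := by unfold Spec_isRailroadTie1; infer_instance

-- ===== CLAIM (what is proved, stated in full; the proofs are below) =====
def Claim_equal_isRailroadTie1 : Prop := ∀ (arr : List Int), Dom_isRailroadTie1 arr → Spec_isRailroadTie1 arr (isRailroadTie1 arr)

-- ===== LEMMAS AND PROOFS =====

def gA : Bool → List Int → Int
  | _, [] => 1
  | prevNZ, x :: t =>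
    if x = 0 then
      if prevNZ = false then 0
      else match t with
        | [] => 0
        | y :: _ => if y = 0 then 0 else gA false t
    else
      let nb : Int := (if prevNZ then 1 else 0) + (if (t.headD 0) ≠ 0 then 1 else 0)
      if nb ≠ 1 then 0 else gA true t

theorem pyGet?_getD_nat (arr : List Int) (k : Nat) (h : k < arr.length) :
    (PySem.List.pyGet? arr (k : Int)).getD 0 = arr[k] := by
  rw [PySem.List.pyGet?_natCast, List.getElem?_eq_getElem h]; rfl

theorem aloop_eq_gA (arr : List Int) (i : Nat) (hi : i ≤ arr.length) :
    isRailroadTie1Loop arr arr.length i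
      = gA (decide (0 < i) && decide ((PySem.List.pyGet? arr ((i : Int) - 1)).getD 0 ≠ 0))
           (arr.drop i) := by
  by_cases h : i < arr.length
  · have hd : arr.drop i = arr[i] :: arr.drop (i + 1) := List.drop_eq_getElem_cons h
    have hx : (PySem.List.pyGet? arr (i : Int)).getD 0 = arr[i] := pyGet?_getD_nat arr i h
    have ih := aloop_eq_gA arr (i + 1) (by omega)
    have hprevcast : ((i + 1 : Nat) : Int) - 1 = (i : Int) := by push_cast; ring
    rw [hprevcast, hx] at ih
    rw [isRailroadTie1Loop]
    simp only [h, dite_true, hx, hd]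
    rw [ih]
    simp only [gA]
    by_cases hz : arr[i] = 0
    · by_cases hi0 : i = 0
      · subst hi0; simp [hz]
      · have hprev : (PySem.List.pyGet? arr ((i : Int) - 1)).getD 0 = arr[i-1] := by
          have hc : (i : Int) - 1 = ((i - 1 : Nat) : Int) := by omega
          rw [hc]; exact pyGet?_getD_nat arr (i - 1) (by omega)
        by_cases hlast : i = arr.length - 1
        · have htail : arr.drop (i + 1) = [] := List.drop_eq_nil_of_le (by omega)
          have hor : i = 0 ∨ i = arr.length - 1 := Or.inr hlast
          by_cases hp : arr[i-1] = 0
          · simp [hz, hprev, hp, hor]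
          · simp [hz, htail, hprev, hp, hor]
        · have hi1 : i + 1 < arr.length := by omega
          have htail : arr.drop (i + 1) = arr[i+1] :: arr.drop (i + 2) :=
            List.drop_eq_getElem_cons hi1
          have hnext : (PySem.List.pyGet? arr ((i : Int) + 1)).getD 0 = arr[i+1] := by
            have hc : (i : Int) + 1 = ((i + 1 : Nat) : Int) := by push_cast; ring
            rw [hc]; exact pyGet?_getD_nat arr (i + 1) hi1
          by_cases hp : arr[i-1] = 0
          · simp [hz, hi0, hlast, hprev, hnext, hp]
          · by_cases hn : arr[i+1] = 0
            · simp [hz, hi0, hlast, htail, hprev, hnext, hp, hn]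
            · have hP : (decide (0 < i) && decide ((PySem.List.pyGet? arr ((i:Int) - 1)).getD 0 ≠ 0)) = true := by
                simp [hprev, hp, show 0 < i from by omega]
              have hF : (decide (0 < i + 1) && decide (arr[i] ≠ 0)) = false := by simp [hz]
              rw [hP, hF, htail]
              simp [hz, hi0, hlast, hprev, hnext, hp, hn]
    · rw [if_neg hz, if_neg hz]
      have hb' : (decide (0 < i + 1) && decide (arr[i] ≠ 0)) = true := by simp [hz]
      rw [hb']
      show (if ((if 0 < i ∧ (PySem.List.pyGet? arr ((i : Int) - 1)).getD 0 ≠ 0 then (1:Int) else 0)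
              + (if i < arr.length - 1 ∧ (PySem.List.pyGet? arr ((i : Int) + 1)).getD 0 ≠ 0 then (1:Int) else 0)) ≠ 1
            then 0 else gA true (arr.drop (i+1))) = _
      have e1 : (if 0 < i ∧ (PySem.List.pyGet? arr ((i : Int) - 1)).getD 0 ≠ 0 then (1:Int) else 0)
          = (if (decide (0 < i) && decide ((PySem.List.pyGet? arr ((i : Int) - 1)).getD 0 ≠ 0)) = true then (1:Int) else 0) := by
        by_cases hA : 0 < i ∧ (PySem.List.pyGet? arr ((i : Int) - 1)).getD 0 ≠ 0 <;> simp [hA]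
      have e2 : (if i < arr.length - 1 ∧ (PySem.List.pyGet? arr ((i : Int) + 1)).getD 0 ≠ 0 then (1:Int) else 0)
          = (if ((arr.drop (i+1)).headD 0) ≠ 0 then (1:Int) else 0) := by
        by_cases hlast : i + 1 < arr.length
        · have htail : arr.drop (i + 1) = arr[i+1] :: arr.drop (i + 2) :=
            List.drop_eq_getElem_cons hlast
          have hnext : (PySem.List.pyGet? arr ((i : Int) + 1)).getD 0 = arr[i+1] := by
            have hc : (i : Int) + 1 = ((i + 1 : Nat) : Int) := by push_cast; ring
            rw [hc]; exact pyGet?_getD_nat arr (i + 1) hlast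
          rw [htail, hnext]
          have : i < arr.length - 1 := by omega
          have hg : arr[i+1]?.getD 0 = arr[i+1] := by
            rw [List.getElem?_eq_getElem hlast]; rfl
          simp [this, hg]
        · have htail : arr.drop (i + 1) = [] := List.drop_eq_nil_of_le (by omega)
          have : ¬ i < arr.length - 1 := by omega
          rw [htail]
          simp [this]
      rw [e1, e2]
  · have hge : arr.drop i = [] := List.drop_eq_nil_of_le (by omega)
    rw [isRailroadTie1Loop]
    simp [show ¬ i < arr.length from h, hge, gA]
termination_by arr.length - i

def sepB : List Int → Bool
  | [] => true
  | z :: a :: b :: t => z == 0 && a != 0 && b != 0 && sepB t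
  | _ => false

def topB : List Int → Int
  | a :: b :: t => if a ≠ 0 ∧ b ≠ 0 ∧ sepB t then 1 else 0
  | _ => 0

theorem sepB_short_false (l : List Int) (h1 : l ≠ []) (h2 : l.length < 3) : sepB l = false := by
  match l with
  | [] => exact absurd rfl h1
  | [x] => rfl
  | [x, y] => rfl
  | x :: y :: z :: t => simp at h2; omega

theorem bloop_eq_sepB (arr : List Int) (i : Nat) (hi : i ≤ arr.length) :
    isRailroadTie1AltLoop arr arr.length i = if sepB (arr.drop i) then 1 else 0 := by
  by_cases h : i < arr.length
  · rw [isRailroadTie1AltLoop]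
    simp only [h, dite_true]
    by_cases hk : arr.length < i + 3
    · have hne : arr.drop i ≠ [] := by
        rw [Ne, List.drop_eq_nil_iff]; omega
      have hlen : (arr.drop i).length < 3 := by
        rw [List.length_drop]; omega
      rw [if_pos (Or.inl hk), sepB_short_false _ hne hlen]
      simp
    · have h1 : i + 1 < arr.length := by omega
      have h2 : i + 2 < arr.length := by omega
      have hg0 : (PySem.List.pyGet? arr (i : Int)).getD 0 = arr[i] := pyGet?_getD_nat arr i h
      have hg1 : (PySem.List.pyGet? arr ((i : Int) + 1)).getD 0 = arr[i+1] := by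
        have hc : (i : Int) + 1 = ((i + 1 : Nat) : Int) := by push_cast; ring
        rw [hc]; exact pyGet?_getD_nat arr (i + 1) h1
      have hg2 : (PySem.List.pyGet? arr ((i : Int) + 2)).getD 0 = arr[i+2] := by
        have hc : (i : Int) + 2 = ((i + 2 : Nat) : Int) := by push_cast; ring
        rw [hc]; exact pyGet?_getD_nat arr (i + 2) h2
      have hd : arr.drop i = arr[i] :: arr[i+1] :: arr[i+2] :: arr.drop (i + 3) := by
        rw [List.drop_eq_getElem_cons h, List.drop_eq_getElem_cons h1, List.drop_eq_getElem_cons h2]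
      have ih := bloop_eq_sepB arr (i + 3) (by omega)
      rw [hg0, hg1, hg2, hd]
      by_cases c0 : arr[i] = 0
      · by_cases c1 : arr[i+1] = 0
        · simp [sepB, hk, c0, c1]
        · by_cases c2 : arr[i+2] = 0
          · simp [sepB, hk, c0, c1, c2]
          · rw [if_neg (by simp [hk, c0, c1, c2])]
            rw [ih]
            simp [sepB, c0, c1, c2]
      · simp [sepB, hk, c0]
  · have hge : arr.drop i = [] := List.drop_eq_nil_of_le (by omega)
    rw [isRailroadTie1AltLoop]
    simp [show ¬ i < arr.length from h, hge, sepB]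
termination_by arr.length - i

theorem sepB_cons_ne (c : Int) (t : List Int) (hc : c ≠ 0) : sepB (c :: t) = false := by
  match t with
  | [] => rfl
  | [x] => rfl
  | x :: y :: t' => simp [sepB, hc]

theorem gA_cons (p : Bool) (x : Int) (t : List Int) :
    gA p (x :: t) =
      if x = 0 then
        if p = false then 0
        else match t with
          | [] => 0
          | y :: _ => if y = 0 then 0 else gA false t
      else
        if ((if p then (1:Int) else 0) + (if (t.headD 0) ≠ 0 then 1 else 0)) ≠ 1 then 0
        else gA true t := rfl

theorem gA_topB (n : Nat) : ∀ l : List Int, l.length ≤ n →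
    (l ≠ [] → gA false l = topB l) ∧
    (∀ b t, l = b :: t → b ≠ 0 → gA true l = if sepB t then 1 else 0) := by
  induction n with
  | zero =>
    intro l hl
    have : l = [] := List.eq_nil_of_length_eq_zero (by omega)
    subst this
    exact ⟨fun hne => absurd rfl hne, fun b t h _ => by simp at h⟩
  | succ n ihn =>
    intro l hl
    constructor
    · intro hne
      match l with
      | a :: t =>
        rw [gA_cons]
        by_cases ha : a = 0
        · subst ha
          match t with
          | [] => simp [topB]
          | b :: t' => simp [topB]
        · rw [if_neg ha]
          match t with
          | [] => simp [topB]
          | b :: t' =>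
            by_cases hb : b = 0
            · simp [topB, ha, hb]
            · have hT := (ihn (b :: t') (by simp at hl ⊢; omega)).2 b t' rfl hb
              rw [hT]
              simp [topB, ha, hb]
    · intro b t hlbt hb
      subst hlbt
      rw [gA_cons, if_neg hb]
      match t with
      | [] => simp [gA, sepB]
      | c :: t' =>
        by_cases hc : c = 0
        · subst hc
          simp only [List.headD_cons]
          rw [if_neg (by norm_num)]
          rw [gA_cons]
          rw [if_pos rfl]
          rw [if_neg (by simp)]
          match t' with
          | [] => simp [sepB]
          | d :: t'' =>
            show (if d = 0 then (0:Int) else gA false (d :: t''))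
                = if sepB (0 :: d :: t'') = true then 1 else 0
            by_cases hd : d = 0
            · rw [if_pos hd]
              match t'' with
              | [] => simp [sepB]
              | e :: r => simp [sepB, hd]
            · rw [if_neg hd]
              have hS := (ihn (d :: t'') (by simp at hl ⊢; omega)).1 (by simp)
              rw [hS]
              match t'' with
              | [] => simp [topB, sepB]
              | e :: r => simp [topB, sepB, hd]
        · rw [sepB_cons_ne c t' hc]
          rw [if_pos (by simp [hc])]
          simp


theorem topB_head_zero (t : List Int) : topB (0 :: t) = 0 := by
  match t with
  | [] => rfl
  | b :: t' => simp [topB]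

theorem alt_eq_topB (arr : List Int) : isRailroadTie1_alt arr = topB arr := by
  match arr with
  | [] => rfl
  | [a] => rfl
  | a :: b :: t =>
    simp only [isRailroadTie1_alt]
    have hlen : ¬ (a :: b :: t).length < 2 := by simp
    have hga : (PySem.List.pyGet? (a :: b :: t) 0).getD 0 = a := by
      rw [PySem.List.pyGet?_zero_cons]; rfl
    have hgb : (PySem.List.pyGet? (a :: b :: t) 1).getD 0 = b := by
      simp [PySem.List.pyGet?, PySem.List.pyIdx?]
    rw [hga, hgb]
    by_cases ha : a = 0
    · rw [if_pos (Or.inr (Or.inl ha)), ha, topB_head_zero]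
    · by_cases hb : b = 0
      · rw [if_pos (Or.inr (Or.inr hb))]
        simp [topB, hb]

      · rw [if_neg (by simp [ha, hb])]
        have h2 := bloop_eq_sepB (a :: b :: t) 2 (by simp)
        rw [h2]
        simp [topB, ha, hb]

theorem a_eq_topB (arr : List Int) : isRailroadTie1 arr = topB arr := by
  match arr with
  | [] => rfl
  | a :: t =>
    simp only [isRailroadTie1]
    rw [if_neg (by simp)]
    by_cases hz : (a :: t).all (fun x => x == 0)
    · rw [if_pos hz]
      have ha : a = 0 := by simp at hz; exact hz.1
      rw [ha, topB_head_zero]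
    · rw [if_neg hz]
      have h0 := aloop_eq_gA (a :: t) 0 (by simp)
      simp only [Nat.cast_zero, List.drop_zero] at h0
      rw [h0, show (decide (0 < 0) && decide ((PySem.List.pyGet? (a :: t) (0 - 1 : Int)).getD 0 ≠ 0)) = false by simp]
      exact (gA_topB (a :: t).length (a :: t) le_rfl).1 (by simp)


-- ===== VERDICT (by name: the statement is the Claim_ definition above) =====
theorem isRailroadTie1_spec : Claim_equal_isRailroadTie1 := by
  intro arr _
  unfold Spec_isRailroadTie1
  rw [a_eq_topB, alt_eq_topB]
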